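-- pv_equiv track=rewrite | github.com/aiminsu/Interview | add_numbers_in_string.py | solution
-- ===== SOURCE A (Python) =====
-- def solution(s):
--     num = 0
--     res = 0
--     sign = 1
--     for val in s:
--         if val.isdigit():
--             num = num*10 + sign*int(val)
--         elif val == '-':
--             res += num
--             num = 0
--             sign = -1
--         elif val == '+':
--             res += num
--             num = 0
--             sign = 1
--     res += num
--     return res
-- ===== SOURCE B (Python) =====
-- def solution(s):
--     # Staged: (1) keep only digits and signs, (2) tokenize into digit-run
--     # integers and sign symbols, (3) fold tokens with a current sign.
--     cleaned = [c for c in s if c.isdigit() or c in '+-']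
--     tokens = []
--     i = 0
--     n = len(cleaned)
--     while i < n:
--         if cleaned[i].isdigit():
--             j = i
--             while j < n and cleaned[j].isdigit():
--                 j += 1
--             tokens.append(int(''.join(cleaned[i:j])))
--             i = j
--         else:
--             tokens.append(cleaned[i])
--             i += 1
--     res = 0
--     sign = 1
--     for t in tokens:
--         if t == '+':
--             sign = 1
--         elif t == '-':
--             sign = -1
--         else:
--             res += sign * t
--     return res
-- ===== Notes on version B (the rewrite author's own statement) =====
-- stated objective: alternative
-- what changed: B is a staged pipeline - filter the string to digits and signs, tokenize it into digit-run integers and sign symbols, then fold the token list with a current sign - instead of A's single character-wise pass with a pending signed Horner accumulator.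
import Mathlib
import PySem

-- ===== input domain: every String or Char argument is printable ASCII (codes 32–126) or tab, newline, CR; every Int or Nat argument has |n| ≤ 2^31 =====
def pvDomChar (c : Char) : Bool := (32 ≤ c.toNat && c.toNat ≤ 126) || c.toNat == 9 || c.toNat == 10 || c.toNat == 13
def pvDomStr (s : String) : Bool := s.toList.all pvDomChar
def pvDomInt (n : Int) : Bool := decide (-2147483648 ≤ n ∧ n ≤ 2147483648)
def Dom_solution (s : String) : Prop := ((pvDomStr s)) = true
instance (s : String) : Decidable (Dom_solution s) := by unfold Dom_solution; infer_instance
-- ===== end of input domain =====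

-- B replaces A's single character pass (pending signed Horner accumulator) by a staged
-- filter → tokenize → fold pipeline; same return value, objective: alternative.

-- ===== PORT A =====
-- A's loop step on state (num, res, sign); int(val) on a digit char is its
-- code point minus 48 (exact: the isdigit guard admits only '0'-'9' on the ASCII domain).
def solutionStep (p : Int × Int × Int) (c : Char) : Int × Int × Int :=
  if PySem.Chars.isdigit c then (p.1 * 10 + p.2.2 * ((c.toNat : Int) - 48), p.2.1, p.2.2)
  else if c = '-' then (0, p.2.1 + p.1, -1)
  else if c = '+' then (0, p.2.1 + p.1, 1)
  else p

def solution (s : String) : Int :=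
  let st := s.toList.foldl solutionStep (0, 0, 1)
  st.2.1 + st.1

-- ===== PORT B =====
-- B's filter predicate: c.isdigit() or c in '+-'.
def keepB (c : Char) : Bool := PySem.Chars.isdigit c || c = '+' || c = '-'

-- int(''.join(ds)) for a nonempty digit run (exact there: plain base-10 value).
def valB (ds : List Char) : Int := ds.foldl (fun a c => a * 10 + ((c.toNat : Int) - 48)) 0

-- Source B's index while-loop, as the obvious recursion: a digit at the front takes
-- the whole maximal digit run as one integer token, any other kept char is a
-- one-character token.
def tokenizeB : List Char → List (Int ⊕ Char)
  | [] => []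
  | c :: cs =>
    if PySem.Chars.isdigit c then
      Sum.inl (valB (c :: cs.takeWhile PySem.Chars.isdigit)) :: tokenizeB (cs.dropWhile PySem.Chars.isdigit)
    else
      Sum.inr c :: tokenizeB cs
termination_by cs => cs.length
decreasing_by
  · exact Nat.lt_succ_of_le (List.length_dropWhile_le _ _)
  · simp

-- Source B's token loop body on state (res, sign).
def evalStepB (p : Int × Int) (t : Int ⊕ Char) : Int × Int :=
  match t with
  | Sum.inr c => if c = '+' then (p.1, 1) else if c = '-' then (p.1, -1) else p
  | Sum.inl n => (p.1 + p.2 * n, p.2)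

def solution_alt (s : String) : Int :=
  let cleaned := s.toList.filter keepB
  let tokens := tokenizeB cleaned
  (tokens.foldl evalStepB (0, 1)).1

-- ===== PRECONDITION & SPEC =====
def Spec_solution (s : String) (out : Int) : Prop := out = solution_alt s
instance (s : String) (out : Int) : Decidable (Spec_solution s out) := by unfold Spec_solution; infer_instance

-- ===== CLAIM (what is proved, stated in full; the proofs are below) =====
def Claim_equal_solution : Prop := ∀ (s : String), Dom_solution s → Spec_solution s (solution s)

-- ===== LEMMAS AND PROOFS =====

-- A's step ignores characters B's filter drops.
theorem stepA_skip {c : Char} (h : keepB c = false) (p : Int × Int × Int) :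
    solutionStep p c = p := by
  simp only [keepB, Bool.or_eq_false_iff, decide_eq_false_iff_not] at h
  simp [solutionStep, h.1.1, h.1.2, h.2]

-- Hence A's fold only sees the filtered characters.
theorem foldA_filter (cs : List Char) (p : Int × Int × Int) :
    cs.foldl solutionStep p = (cs.filter keepB).foldl solutionStep p := by
  induction cs generalizing p with
  | nil => rfl
  | cons c cs ih =>
    by_cases h : keepB c = true
    · simp [h, List.foldl_cons, ih]
    · rw [List.filter_cons, List.foldl_cons, stepA_skip (Bool.eq_false_iff.mpr h)]
      simp [Bool.eq_false_iff.mpr h, ih]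

-- A over a pure digit run: res and sign are untouched, num evolves by signed Horner.
theorem foldA_digits (ds : List Char) (h : ∀ c ∈ ds, PySem.Chars.isdigit c = true)
    (num res sign : Int) :
    ds.foldl solutionStep (num, res, sign)
      = (ds.foldl (fun a c => a * 10 + sign * ((c.toNat : Int) - 48)) num, res, sign) := by
  induction ds generalizing num with
  | nil => rfl
  | cons d ds ih =>
    have hd := h d (List.mem_cons_self ..)
    rw [List.foldl_cons, List.foldl_cons]
    simp only [solutionStep, hd, if_pos]
    exact ih (fun c hc => h c (List.mem_cons_of_mem _ hc)) _

-- Signed Horner from a signed seed is the sign times the unsigned Horner.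
theorem horner_sign (ds : List Char) (sign : Int) :
    ∀ a : Int, ds.foldl (fun a c => a * 10 + sign * ((c.toNat : Int) - 48)) (sign * a)
      = sign * ds.foldl (fun a c => a * 10 + ((c.toNat : Int) - 48)) a := by
  induction ds with
  | nil => intro a; rfl
  | cons d ds ih =>
    intro a
    rw [List.foldl_cons, List.foldl_cons]
    have : sign * a * 10 + sign * ((d.toNat : Int) - 48)
        = sign * (a * 10 + ((d.toNat : Int) - 48)) := by ring
    rw [this, ih]

-- B's token fold: the starting res component only translates the result.
theorem evalB_start (ts : List (Int ⊕ Char)) :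
    ∀ res sign : Int,
      (ts.foldl evalStepB (res, sign)).1 = res + (ts.foldl evalStepB (0, sign)).1 := by
  induction ts with
  | nil => intro res sign; simp
  | cons t ts ih =>
    intro res sign
    match t with
    | Sum.inl n =>
      rw [List.foldl_cons, List.foldl_cons]
      simp only [evalStepB]
      rw [ih, ih (0 + sign * n)]
      ring
    | Sum.inr c =>
      rw [List.foldl_cons, List.foldl_cons]
      simp only [evalStepB]
      split_ifs <;> exact ih _ _

-- Main invariant: on a fully kept character list, A's finished fold equals B's
-- token evaluation, for any starting res and sign.
theorem foldA_eq_tokens (n : Nat) : ∀ cs : List Char, cs.length ≤ n →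
    (∀ c ∈ cs, keepB c = true) → ∀ res sign : Int,
      (cs.foldl solutionStep (0, res, sign)).2.1 + (cs.foldl solutionStep (0, res, sign)).1
        = res + ((tokenizeB cs).foldl evalStepB (0, sign)).1 := by
  induction n with
  | zero =>
    intro cs hlen _ res sign
    have : cs = [] := List.eq_nil_of_length_eq_zero (Nat.le_zero.mp hlen)
    subst this; simp [tokenizeB]
  | succ n ih =>
    intro cs hlen hkeep res sign
    match cs with
    | [] => simp [tokenizeB]
    | c :: cs =>
      have hcslen : cs.length ≤ n := by simp at hlen; omega
      by_cases hd : PySem.Chars.isdigit c = true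
      · -- digit run at the front
        have hsplit : c :: cs
            = (c :: cs.takeWhile PySem.Chars.isdigit) ++ cs.dropWhile PySem.Chars.isdigit := by
          simp [List.takeWhile_append_dropWhile]
        rw [tokenizeB]
        simp only [hd, if_pos]
        set run := c :: cs.takeWhile PySem.Chars.isdigit with hrun
        have hrundig : ∀ x ∈ run, PySem.Chars.isdigit x = true := by
          intro x hx
          rcases List.mem_cons.mp hx with h | h
          · subst h; exact hd
          · exact List.mem_takeWhile_imp h
        have hA : (c :: cs).foldl solutionStep (0, res, sign)
            = (cs.dropWhile PySem.Chars.isdigit).foldl solutionStep (sign * valB run, res, sign) := by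
          conv_lhs => rw [hsplit]
          rw [List.foldl_append, foldA_digits run hrundig]
          have h0 : (0 : Int) = sign * 0 := by ring
          rw [h0, horner_sign]
          rfl
        rw [hA, List.foldl_cons]
        simp only [evalStepB]
        rw [evalB_start]
        have hrestlen : (cs.dropWhile PySem.Chars.isdigit).length ≤ n :=
          le_trans (List.length_dropWhile_le _ _) hcslen
        have hrestkeep : ∀ x ∈ cs.dropWhile PySem.Chars.isdigit, keepB x = true := by
          intro x hx
          exact hkeep x (by rw [hsplit]; exact List.mem_append_right _ hx)
        match hre : cs.dropWhile PySem.Chars.isdigit, hrestlen, hrestkeep with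
        | [], _, _ => simp [tokenizeB]
        | d :: rest', hrestlen, hrestkeep =>
          have hdnd : PySem.Chars.isdigit d = false := by
            have hne : cs.dropWhile PySem.Chars.isdigit ≠ [] := by rw [hre]; simp
            have h2 := List.head_dropWhile_not (l := cs) PySem.Chars.isdigit hne
            simp only [hre, List.head_cons] at h2
            simpa using h2
          have hdk : keepB d = true := hrestkeep d (List.mem_cons_self ..)
          have hdsign : d = '+' ∨ d = '-' := by
            simp only [keepB, hdnd, Bool.false_or, Bool.or_eq_true, decide_eq_true_eq] at hdk
            exact hdk
          have hlen' : rest'.length ≤ n := by simp at hrestlen; omega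
          have hkeep' : ∀ x ∈ rest', keepB x = true :=
            fun x hx => hrestkeep x (List.mem_cons_of_mem _ hx)
          rw [tokenizeB]
          simp only [hdnd, Bool.false_eq_true, if_false]
          rcases hdsign with h | h <;> subst h
          · have e1 : solutionStep (sign * valB run, res, sign) '+'
                = (0, res + sign * valB run, 1) := by
              simp [solutionStep, show PySem.Chars.isdigit '+' = false from by decide]
            have e2 : evalStepB (0, sign) (Sum.inr '+') = (0, 1) := by simp [evalStepB]
            rw [List.foldl_cons, e1, List.foldl_cons, e2,
              ih rest' hlen' hkeep' (res + sign * valB run) 1, evalB_start]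
            ring
          · have e1 : solutionStep (sign * valB run, res, sign) '-'
                = (0, res + sign * valB run, -1) := by
              simp [solutionStep, show PySem.Chars.isdigit '-' = false from by decide]
            have e2 : evalStepB (0, sign) (Sum.inr '-') = (0, -1) := by simp [evalStepB]
            rw [List.foldl_cons, e1, List.foldl_cons, e2,
              ih rest' hlen' hkeep' (res + sign * valB run) (-1), evalB_start]
            ring
      · -- a kept non-digit: a sign character
        have hck : keepB c = true := hkeep c (List.mem_cons_self ..)
        have hcsign : c = '+' ∨ c = '-' := by
          simp only [keepB, Bool.or_eq_true, decide_eq_true_eq] at hck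
          rcases hck with (h | h) | h
          · exact absurd h hd
          · exact Or.inl h
          · exact Or.inr h
        have hkeep' : ∀ x ∈ cs, keepB x = true :=
          fun x hx => hkeep x (List.mem_cons_of_mem _ hx)
        rw [tokenizeB]
        rcases hcsign with h | h <;> subst h
        · simp only [show PySem.Chars.isdigit '+' = false from by decide,
            Bool.false_eq_true, if_false]
          have e1 : solutionStep (0, res, sign) '+' = (0, res + 0, 1) := by
            simp [solutionStep, show PySem.Chars.isdigit '+' = false from by decide]
          have e2 : evalStepB (0, sign) (Sum.inr '+') = (0, 1) := by simp [evalStepB]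
          rw [List.foldl_cons, e1, List.foldl_cons, e2, ih cs hcslen hkeep' (res + 0) 1]
          ring
        · simp only [show PySem.Chars.isdigit '-' = false from by decide,
            Bool.false_eq_true, if_false]
          have e1 : solutionStep (0, res, sign) '-' = (0, res + 0, -1) := by
            simp [solutionStep, show PySem.Chars.isdigit '-' = false from by decide]
          have e2 : evalStepB (0, sign) (Sum.inr '-') = (0, -1) := by simp [evalStepB]
          rw [List.foldl_cons, e1, List.foldl_cons, e2, ih cs hcslen hkeep' (res + 0) (-1)]
          ring

-- ===== VERDICT (by name: the statement is the Claim_ definition above) =====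
theorem solution_spec : Claim_equal_solution := by
  intro s _
  unfold Spec_solution solution solution_alt
  simp only
  rw [foldA_filter]
  simpa using foldA_eq_tokens (s.toList.filter keepB).length _ le_rfl
    (fun c hc => List.of_mem_filter hc) 0 1
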